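-- pv_equiv track=rewrite | github.com/brianhie/prosodic | accuracy.py | compare_parses
-- ===== SOURCE A (Python) =====
-- def compare_parses(parse1, parse2):
--     if len(parse1) == 0 or len(parse2) == 0:
--         return 0, 0
--
--     if len(parse1) > len(parse2):
--         parse1, parse2 = parse2, parse1
--
--     offset = len(parse2) - len(parse1)
--     o_to_correct = {}
--     o = 0
--     while True:
--         n_correct = 0
--         for i in range(len(parse1)):
--             if parse1[i] == parse2[i + o]:
--                 n_correct += 1
--         o_to_correct[o] = n_correct
--         if o == offset:
--             break
--         o += 1
--
--     max_correct = -1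
--     for o in o_to_correct:
--         if o_to_correct[o] > max_correct:
--             max_correct = o_to_correct[o]
--     assert(max_correct != -1)
--
--     return max_correct, len(parse2)
-- ===== SOURCE B (Python) =====
-- def compare_parses(parse1, parse2):
--     if len(parse1) == 0 or len(parse2) == 0:
--         return 0, 0
--     if len(parse1) <= len(parse2):
--         s, t = parse1, parse2
--     else:
--         s, t = parse2, parse1
--     offset = len(t) - len(s)
--     # bucket the positions of each symbol of the longer parse once,
--     # then count matches per shift only where symbols actually coincide
--     pos = {}
--     for j, c in enumerate(t):
--         pos.setdefault(c, []).append(j)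
--     ctr = [0] * (offset + 1)
--     for i, c in enumerate(s):
--         for j in pos.get(c, ()):
--             o = j - i
--             if 0 <= o <= offset:
--                 ctr[o] += 1
--     return max(ctr), len(t)
-- ===== Notes on version B (the rewrite author's own statement) =====
-- stated objective: alternative
-- what changed: Instead of rescoring every position at every shift, B indexes the positions of each symbol of the longer parse once and increments a per-shift counter only for actually matching symbol pairs (match-driven cross-correlation), then takes the max of the counter array; it trades A's O(n*(offset+1)) scan for work proportional to the number of equal-symbol pairs, which is cheaper on diverse alphabets but costlier on duplicate-heavy strings.
import Mathlib
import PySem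

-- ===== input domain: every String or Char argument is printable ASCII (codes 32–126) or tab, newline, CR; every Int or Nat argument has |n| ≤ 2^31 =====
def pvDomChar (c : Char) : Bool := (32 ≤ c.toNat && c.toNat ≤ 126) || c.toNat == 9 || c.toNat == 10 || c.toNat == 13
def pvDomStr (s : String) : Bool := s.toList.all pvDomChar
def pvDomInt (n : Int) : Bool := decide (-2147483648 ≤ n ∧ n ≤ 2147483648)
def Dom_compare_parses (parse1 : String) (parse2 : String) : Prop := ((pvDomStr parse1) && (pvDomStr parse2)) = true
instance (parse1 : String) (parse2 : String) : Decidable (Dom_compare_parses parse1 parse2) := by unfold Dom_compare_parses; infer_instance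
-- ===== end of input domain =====

-- B replaces A's shift-by-shift rescoring with a per-symbol position index of the longer
-- parse and a match-driven per-shift counter (alternative algorithm, same exact result).

-- ===== PORT A =====
-- post-swap body of A: p.1 is the shorter parse, p.2 the longer
def pvAcore (p : List Char × List Char) : Int × Int :=
  let offset : Int := (p.2.length : Int) - (p.1.length : Int)
  -- the while loop runs o = 0, 1, …, offset, recording n_correct in the dict
  let d : PySem.Dict Int Int :=
    (PySem.List.pyRange 0 (offset + 1) 1).foldl
      (fun d o =>
        d.insert o
          ((PySem.List.pyRange 0 (p.1.length : Int) 1).foldl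
            (fun n i =>
              if PySem.List.pyGetD p.1 i ' ' == PySem.List.pyGetD p.2 (i + o) ' ' then n + 1 else n)
            (0 : Int)))
      PySem.Dict.empty
  -- max loop over the dict keys, starting from -1
  let mx := d.keys.foldl (fun mx o => if d.getD o 0 > mx then d.getD o 0 else mx) (-1 : Int)
  (mx, (p.2.length : Int))

def compare_parses (parse1 : String) (parse2 : String) : Int × Int :=
  if parse1.toList.length = 0 ∨ parse2.toList.length = 0 then (0, 0)
  else pvAcore (if parse1.toList.length > parse2.toList.length then (parse2.toList, parse1.toList)
                else (parse1.toList, parse2.toList))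

-- ===== PORT B =====
-- post-swap body of B: st.1 is the shorter parse, st.2 the longer
def pvBcore (st : List Char × List Char) : Int × Int :=
  let offset : Int := (st.2.length : Int) - (st.1.length : Int)
  -- pos: positions of each symbol in the longer parse (pos.setdefault(c, []).append(j))
  let pos : PySem.Dict Char (List Int) :=
    (PySem.List.enumerate st.2).foldl (fun d jc => d.modify jc.2 [] (· ++ [jc.1])) PySem.Dict.empty
  -- match-driven counting: ctr[o] += 1 for each matching pair at shift o
  let ctr : List Int :=
    (PySem.List.enumerate st.1).foldl
      (fun ctr ic =>
        (pos.getD ic.2 []).foldl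
          (fun ctr j =>
            if 0 ≤ j - ic.1 ∧ j - ic.1 ≤ offset then
              PySem.List.pySetD ctr (j - ic.1) (PySem.List.pyGetD ctr (j - ic.1) 0 + 1)
            else ctr)
          ctr)
      (List.replicate (offset + 1).toNat 0)
  ((PySem.List.max? ctr (fun x => x)).getD 0, (st.2.length : Int))

def compare_parses_alt (parse1 : String) (parse2 : String) : Int × Int :=
  if parse1.toList.length = 0 ∨ parse2.toList.length = 0 then (0, 0)
  else pvBcore (if parse1.toList.length ≤ parse2.toList.length then (parse1.toList, parse2.toList)
                else (parse2.toList, parse1.toList))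

-- ===== PRECONDITION & SPEC =====
def Spec_compare_parses (parse1 : String) (parse2 : String) (out : Int × Int) : Prop := out = compare_parses_alt parse1 parse2
instance (parse1 : String) (parse2 : String) (out : Int × Int) : Decidable (Spec_compare_parses parse1 parse2 out) := by unfold Spec_compare_parses; infer_instance

-- ===== CLAIM (what is proved, stated in full; the proofs are below) =====
def Claim_equal_compare_parses : Prop := ∀ (parse1 : String) (parse2 : String), Dom_compare_parses parse1 parse2 → Spec_compare_parses parse1 parse2 (compare_parses parse1 parse2)

-- ===== LEMMAS AND PROOFS =====

-- number of position matches between s and t at shift o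
def matchN (s t : List Char) (o : Nat) : Nat :=
  (List.range s.length).countP (fun i => s.getD i ' ' == t.getD (i + o) ' ')

-- positions (as Ints) of symbol c in t, in increasing order
def posL (t : List Char) (c : Char) : List Int :=
  ((PySem.List.enumerate t).filter (fun jc => jc.2 == c)).map (fun jc => jc.1)

theorem innerA (s t : List Char) (o : Nat) :
    (PySem.List.pyRange 0 (s.length : Int) 1).foldl
      (fun n i => if PySem.List.pyGetD s i ' ' == PySem.List.pyGetD t (i + (o : Int)) ' ' then n + 1 else n)
      (0 : Int) = (matchN s t o : Int) := by
  rw [PySem.List.pyRange_one]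
  have h1 : ((s.length : Int) - 0).toNat = s.length := by omega
  rw [h1, List.foldl_map]
  have h2 : ∀ (n : Int) (k : Nat), k ∈ List.range s.length →
      (fun (n : Int) (k : Nat) =>
        if PySem.List.pyGetD s ((0 : Int) + k) ' ' == PySem.List.pyGetD t (((0:Int) + k) + (o : Int)) ' ' then n + 1 else n) n k
      = (fun (n : Int) (k : Nat) => if s.getD k ' ' == t.getD (k + o) ' ' then n + 1 else n) n k := by
    intro n k _
    beta_reduce
    have e1 : PySem.List.pyGetD s ((0 : Int) + k) ' ' = s.getD k ' ' := by
      rw [zero_add]; exact PySem.List.pyGetD_natCast s k ' '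
    have e2 : PySem.List.pyGetD t (((0 : Int) + k) + (o : Int)) ' ' = t.getD (k + o) ' ' := by
      have h : ((0 : Int) + k) + (o : Int) = ((k + o : Nat) : Int) := by push_cast; ring
      rw [h]; exact PySem.List.pyGetD_natCast t (k + o) ' '
    rw [e1, e2]
  rw [PySem.List.foldl_congr_mem _ _ _ _ h2, PySem.List.foldl_if_add_one]
  simp [matchN]

theorem posDict_gen (l : List (Int × Char)) (c : Char) :
    ∀ (d : PySem.Dict Char (List Int)),
    (l.foldl (fun d jc => d.modify jc.2 [] (· ++ [jc.1])) d).getD c []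
      = d.getD c [] ++ (l.filter (fun jc => jc.2 == c)).map (fun jc => jc.1) := by
  induction l with
  | nil => intro d; simp
  | cons p rest ih =>
    intro d
    rw [List.foldl_cons, ih]
    by_cases hc : c = p.2
    · rw [List.filter_cons]
      simp [hc, PySem.Dict.getD_modify]
    · rw [List.filter_cons]
      have : (p.2 == c) = false := by simp [BEq.symm_false]; exact fun h => hc h.symm
      simp [this, PySem.Dict.getD_modify, hc]

theorem posDict (t : List Char) (c : Char) :
    ((PySem.List.enumerate t).foldl (fun d jc => d.modify jc.2 [] (· ++ [jc.1])) PySem.Dict.empty).getD c []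
      = posL t c := by
  rw [posDict_gen]
  simp [posL, PySem.Dict.getD_empty]

theorem posL_nodup (t : List Char) (c : Char) : (posL t c).Nodup := by
  have hp : ((PySem.List.enumerate t).filter (fun jc => jc.2 == c)).Pairwise (fun p q => p.1 < q.1) :=
    (PySem.List.pairwise_lt_enumerate t 0).sublist List.filter_sublist
  have : (posL t c).Pairwise (· < ·) := by
    unfold posL
    exact List.pairwise_map.mpr hp
  exact this.nodup

theorem posL_mem (t : List Char) (c : Char) (v : Int) :
    v ∈ posL t c ↔ (0 ≤ v ∧ v.toNat < t.length ∧ t.getD v.toNat ' ' = c) := by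
  unfold posL
  simp only [List.mem_map, List.mem_filter, PySem.List.mem_enumerate_iff]
  constructor
  · rintro ⟨⟨j, ch⟩, ⟨⟨k, hk, hp⟩, hc⟩, hv⟩
    obtain ⟨hj, hch⟩ := Prod.mk.injEq .. ▸ hp
    simp at hc hv
    subst hv
    rw [hj]
    simp only [zero_add] at hj ⊢
    refine ⟨by positivity, ?_, ?_⟩
    · simp [Int.toNat_natCast]; omega
    · rw [Int.toNat_natCast]
      rw [List.getD_eq_getElem _ _ hk]
      rw [hch] at hc; exact hc
  · rintro ⟨h0, hk, hc⟩
    rw [List.getD_eq_getElem _ _ hk] at hc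
    exact ⟨(v, c), ⟨⟨v.toNat, hk, by rw [hc]; simp; omega⟩, by simp⟩, rfl⟩

theorem posL_count (t : List Char) (c : Char) (v : Int) :
    (posL t c).count v = if 0 ≤ v ∧ v.toNat < t.length ∧ t.getD v.toNat ' ' = c then 1 else 0 := by
  by_cases h : 0 ≤ v ∧ v.toNat < t.length ∧ t.getD v.toNat ' ' = c
  · rw [if_pos h]
    exact List.count_eq_one_of_mem (posL_nodup t c) ((posL_mem t c v).mpr h)
  · rw [if_neg h]
    exact List.count_eq_zero_of_not_mem (fun hm => h ((posL_mem t c v).mp hm))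

theorem incr_fold (i off : Int) (l : List Int) : ∀ (ctr : List Int), (ctr.length : Int) = off + 1 →
    (l.foldl (fun c j => if 0 ≤ j - i ∧ j - i ≤ off then
        PySem.List.pySetD c (j - i) (PySem.List.pyGetD c (j - i) 0 + 1) else c) ctr).length = ctr.length ∧
    ∀ o : Nat, o < ctr.length →
      (l.foldl (fun c j => if 0 ≤ j - i ∧ j - i ≤ off then
        PySem.List.pySetD c (j - i) (PySem.List.pyGetD c (j - i) 0 + 1) else c) ctr).getD o 0
        = ctr.getD o 0 + l.count (i + o) := by
  induction l with
  | nil => intro ctr h; simp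
  | cons j rest ih =>
    intro ctr hlen
    rw [List.foldl_cons]
    by_cases hc : 0 ≤ j - i ∧ j - i ≤ off
    · rw [if_pos hc]
      have hsd : PySem.List.pySetD ctr (j - i) (PySem.List.pyGetD ctr (j - i) 0 + 1)
          = ctr.set (j - i).toNat (PySem.List.pyGetD ctr (j - i) 0 + 1) :=
        PySem.List.pySetD_of_nonneg ctr (PySem.List.pyGetD ctr (j - i) 0 + 1) hc.1
      have hlt : (j - i).toNat < ctr.length := by omega
      have hlen' : ((ctr.set (j - i).toNat (PySem.List.pyGetD ctr (j - i) 0 + 1)).length : Int) = off + 1 := by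
        simpa using hlen
      obtain ⟨ihlen, ihget⟩ := ih _ hlen'
      rw [hsd]
      refine ⟨by simpa using ihlen, ?_⟩
      intro o ho
      have ho' : o < (ctr.set (j - i).toNat (PySem.List.pyGetD ctr (j - i) 0 + 1)).length := by simpa using ho
      rw [ihget o ho']
      have hg : PySem.List.pyGetD ctr (j - i) 0 = ctr.getD (j - i).toNat 0 := by
        have := PySem.List.pyGetD_natCast ctr (j - i).toNat (0 : Int)
        rw [← this]; congr 1; omega
      by_cases he : (j - i).toNat = o
      · have hj : j = i + o := by omega
        rw [List.count_cons, if_pos (by simp [hj])]  -- count (j::rest) v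
        have : (ctr.set (j - i).toNat (PySem.List.pyGetD ctr (j - i) 0 + 1)).getD o 0
            = ctr.getD o 0 + 1 := by
          rw [← he, hg]
          rw [List.getD_eq_getElem _ _ (by simpa [he] using ho), List.getElem_set_self]
        rw [this]
        push_cast
        ring
      · have hj : j ≠ i + o := by omega
        rw [List.count_cons, if_neg (by simp [hj])]
        have : (ctr.set (j - i).toNat (PySem.List.pyGetD ctr (j - i) 0 + 1)).getD o 0 = ctr.getD o 0 := by
          rw [List.getD_eq_getElem _ _ (by simpa using ho), List.getElem_set_ne (by omega)]
          rw [List.getD_eq_getElem _ _ ho]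
        rw [this]
        push_cast
        ring
    · rw [if_neg hc]
      obtain ⟨ihlen, ihget⟩ := ih ctr hlen
      refine ⟨ihlen, ?_⟩
      intro o ho
      rw [ihget o ho]
      have hj : j ≠ i + o := by
        intro hh
        apply hc
        constructor <;> omega
      rw [List.count_cons, if_neg (by simp [hj])]
      push_cast
      ring

theorem outer_fold (t : List Char) (off : Int) (s' : List Char) : ∀ (k : Nat) (ctr : List Int),
    (ctr.length : Int) = off + 1 →
    ((PySem.List.enumerate s' (k : Int)).foldl
      (fun ctr ic =>
        ((posL t ic.2).foldl
          (fun c j =>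
            if 0 ≤ j - ic.1 ∧ j - ic.1 ≤ off then
              PySem.List.pySetD c (j - ic.1) (PySem.List.pyGetD c (j - ic.1) 0 + 1)
            else c)
          ctr)) ctr).length = ctr.length ∧
    ∀ o : Nat, o < ctr.length →
      ((PySem.List.enumerate s' (k : Int)).foldl
        (fun ctr ic =>
          ((posL t ic.2).foldl
            (fun c j =>
              if 0 ≤ j - ic.1 ∧ j - ic.1 ≤ off then
                PySem.List.pySetD c (j - ic.1) (PySem.List.pyGetD c (j - ic.1) 0 + 1)
              else c)
            ctr)) ctr).getD o 0
        = ctr.getD o 0 +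
          ((List.range s'.length).countP
            (fun i => decide (k + i + o < t.length) && (s'.getD i ' ' == t.getD (k + i + o) ' ')) : Int) := by
  induction s' with
  | nil => intro k ctr h; simp [PySem.List.enumerate_nil]
  | cons ch rest ih =>
    intro k ctr hlen
    rw [PySem.List.enumerate_cons, List.foldl_cons]
    have hk1 : ((k : Int) + 1) = ((k + 1 : Nat) : Int) := by push_cast; ring
    obtain ⟨slen, sget⟩ := incr_fold (k : Int) off (posL t ch) ctr hlen
    have hlen2 : ((((posL t ch).foldl
          (fun c j =>
            if 0 ≤ j - (k : Int) ∧ j - (k : Int) ≤ off then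
              PySem.List.pySetD c (j - (k : Int)) (PySem.List.pyGetD c (j - (k : Int)) 0 + 1)
            else c) ctr)).length : Int) = off + 1 := by rw [slen]; exact hlen
    rw [hk1]
    obtain ⟨ilen, iget⟩ := ih (k + 1) _ hlen2
    constructor
    · rw [ilen, slen]
    · intro o ho
      have ho2 : o < ((posL t ch).foldl
          (fun c j =>
            if 0 ≤ j - (k : Int) ∧ j - (k : Int) ≤ off then
              PySem.List.pySetD c (j - (k : Int)) (PySem.List.pyGetD c (j - (k : Int)) 0 + 1)
            else c) ctr).length := by rw [slen]; exact ho
      rw [iget o ho2, sget o ho]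
      rw [posL_count]
      have hcond : (0 ≤ (k : Int) + o ∧ ((k : Int) + o).toNat < t.length ∧ t.getD ((k : Int) + o).toNat ' ' = ch)
          ↔ (k + o < t.length ∧ t.getD (k + o) ' ' = ch) := by
        constructor
        · rintro ⟨h1, h2, h3⟩
          have hn : ((k : Int) + o).toNat = k + o := by omega
          rw [hn] at h2 h3; exact ⟨h2, h3⟩
        · rintro ⟨h2, h3⟩
          have hn : ((k : Int) + o).toNat = k + o := by omega
          refine ⟨by positivity, by rw [hn]; exact h2, by rw [hn]; exact h3⟩
      -- countP over (ch :: rest)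
      rw [List.length_cons, List.range_succ_eq_map, List.countP_cons, List.countP_map]
      have hpred : ∀ i ∈ List.range rest.length,
          ((fun i => decide (k + i + o < t.length) && ((ch :: rest).getD i ' ' == t.getD (k + i + o) ' ')) ∘ Nat.succ) i
          = (fun i => decide (k + 1 + i + o < t.length) && (rest.getD i ' ' == t.getD (k + 1 + i + o) ' ')) i := by
        intro i _
        simp only [Function.comp]
        have e1 : k + (i + 1) + o = k + 1 + i + o := by omega
        have e2 : (ch :: rest).getD (i + 1) ' ' = rest.getD i ' ' := by simp [List.getD_cons_succ]
        rw [Nat.succ_eq_add_one, e1, e2]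
      have hcnt : (List.range rest.length).countP
            ((fun i => decide (k + i + o < t.length) && ((ch :: rest).getD i ' ' == t.getD (k + i + o) ' ')) ∘ Nat.succ)
          = (List.range rest.length).countP
            (fun i => decide (k + 1 + i + o < t.length) && (rest.getD i ' ' == t.getD (k + 1 + i + o) ' ')) := by
        apply List.countP_congr
        intro x hx
        rw [hpred x hx]
      rw [hcnt]
      simp only [Nat.add_zero, List.getD_cons_zero]
      by_cases hm : k + o < t.length ∧ t.getD (k + o) ' ' = ch
      · rw [if_pos (hcond.mpr hm)]
        have hb1 : (decide (k + o < t.length) && (ch == t.getD (k + o) ' ')) = true := by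
          simp only [hm.1, decide_true, Bool.true_and, beq_iff_eq]
          exact hm.2.symm
        rw [hb1]
        simp only [Nat.add_comm 1 k]
        push_cast
        ring
      · rw [if_neg (fun hx => hm (hcond.mp hx))]
        have hb0 : (decide (k + o < t.length) && (ch == t.getD (k + o) ' ')) = false := by
          by_cases hb : k + o < t.length
          · simp only [hb, decide_true, Bool.true_and, beq_eq_false_iff_ne, ne_eq]
            exact fun h => hm ⟨hb, h.symm⟩
          · simp [hb]
        rw [hb0]
        first
          | (simp only [Nat.add_comm 1 k]; push_cast; ring)
          | (push_cast; ring)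

theorem max_fold_eq (L : List Int) (h0 : ∀ x ∈ L, 0 ≤ x) (hne : L ≠ []) :
    L.foldl (fun mx v => if v > mx then v else mx) (-1) = (PySem.List.max? L (fun x => x)).getD 0 := by
  match L, hne with
  | x :: tail, _ =>
    rw [PySem.List.max?_id_cons]
    have hmax : ∀ (init : Int) (l : List Int), l.foldl (fun mx v => if v > mx then v else mx) init = l.foldl max init := by
      intro init l
      apply PySem.List.foldl_congr_mem
      intro acc v _
      by_cases h : v > acc
      · rw [if_pos h, max_eq_right (le_of_lt h)]
      · rw [if_neg h, max_eq_left (by omega)]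
    rw [List.foldl_cons, hmax]
    have hx : max (-1 : Int) x = x := by
      have := h0 x (by simp)
      omega
    have : (if x > (-1 : Int) then x else (-1 : Int)) = x := by
      have := h0 x (by simp)
      rw [if_pos (by omega)]
    rw [this]
    simp

theorem core_eq (s t : List Char) (hs : 0 < s.length) (hle : s.length ≤ t.length) :
    pvAcore (s, t) = pvBcore (s, t) := by
  unfold pvAcore pvBcore
  dsimp only
  have hoff : ((t.length : Int) - (s.length : Int)) = ((t.length - s.length : Nat) : Int) := by omega
  set Q : Nat := t.length - s.length with hQ
  set L : List Int := (List.range (Q + 1)).map (fun k => (matchN s t k : Int)) with hL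
  have hLpos : ∀ x ∈ L, (0 : Int) ≤ x := by
    intro x hx
    rw [hL] at hx
    obtain ⟨k, _, hk⟩ := List.mem_map.mp hx
    omega
  have hLne : L ≠ [] := by
    rw [hL]
    simp
  -- ===== A side =====
  rw [hoff]
  have hRQ : ((Q : Int) + 1 - 0).toNat = Q + 1 := by omega
  set R : List Int := (List.range (Q + 1)).map (fun k : Nat => (k : Int)) with hRdef
  have hR : PySem.List.pyRange 0 ((Q : Int) + 1) 1 = R := by
    rw [PySem.List.pyRange_one, hRQ, hRdef]
    simp
  set v : Int → Int := fun o =>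
    (PySem.List.pyRange 0 (s.length : Int) 1).foldl
      (fun n i => if PySem.List.pyGetD s i ' ' == PySem.List.pyGetD t (i + o) ' ' then n + 1 else n)
      (0 : Int) with hv
  have hRnodup : R.Nodup := by
    rw [hRdef]
    refine List.Nodup.map ?_ (List.nodup_range)
    intro a b hab
    simpa using hab
  set d : PySem.Dict Int Int := R.foldl (fun d o => d.insert o (v o)) PySem.Dict.empty with hd
  have hitems : d.items = [] ++ R.map (fun o => (o, v o)) := by
    rw [hd]
    refine PySem.Dict.items_foldl_insert_fresh R (fun o => o) v PySem.Dict.empty ?_ ?_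
    · intro a _
      exact PySem.Dict.contains_empty a
    · simpa using hRnodup
  have hkeys : d.keys = R := by
    have : d.keys = d.items.map (fun p => p.1) := rfl
    rw [this, hitems]
    simp [Function.comp_def]
  have hgetD : ∀ o ∈ R, d.getD o 0 = v o := by
    intro o ho
    have hmem : (o, v o) ∈ d.items := by
      rw [hitems]
      simp only [List.nil_append, List.mem_map]
      exact ⟨o, ho, rfl⟩
    have hnd : d.keys.Nodup := by
      rw [hkeys]
      exact hRnodup
    exact PySem.Dict.getD_of_mem_items _ hmem hnd 0
  have hmxA : d.keys.foldl (fun mx o => if d.getD o 0 > mx then d.getD o 0 else mx) (-1 : Int)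
      = L.foldl (fun mx x => if x > mx then x else mx) (-1) := by
    rw [hkeys]
    have h1 : R.foldl (fun mx o => if d.getD o 0 > mx then d.getD o 0 else mx) (-1 : Int)
        = R.foldl (fun mx o => if v o > mx then v o else mx) (-1) := by
      refine PySem.List.foldl_congr_mem R _ _ (-1) ?_
      intro acc o ho
      rw [hgetD o ho]
    rw [h1, hRdef, hL, List.foldl_map, List.foldl_map]
    refine PySem.List.foldl_congr_mem _ _ _ (-1) ?_
    intro acc k _
    dsimp only
    have hvk : v (k : Int) = (matchN s t k : Int) := by
      rw [hv]
      exact innerA s t k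
    rw [hvk]
  -- ===== B side =====
  have hmax : L.foldl (fun mx x => if x > mx then x else mx) (-1)
      = (PySem.List.max? L (fun x => x)).getD 0 := max_fold_eq L hLpos hLne
  simp only [Prod.mk.injEq]
  refine ⟨?_, trivial⟩
  rw [hR, ← hd, hmxA, hmax]
  have htoNat : (((Q : Int)) + 1).toNat = Q + 1 := by omega
  rw [htoNat]
  simp only [posDict]
  obtain ⟨blen, bget⟩ := outer_fold t (Q : Int) s 0 (List.replicate (Q + 1) 0)
    (by simp)
  simp only [Nat.cast_zero, Nat.zero_add] at blen bget
  have hctr : (PySem.List.enumerate s 0).foldl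
      (fun ctr ic =>
        (posL t ic.2).foldl
          (fun c j =>
            if 0 ≤ j - ic.1 ∧ j - ic.1 ≤ (Q : Int) then
              PySem.List.pySetD c (j - ic.1) (PySem.List.pyGetD c (j - ic.1) 0 + 1)
            else c)
          ctr)
      (List.replicate (Q + 1) 0) = L := by
    apply List.ext_getElem
    · rw [blen, hL]
      simp
    · intro o h1 h2
      have ho : o < Q + 1 := by
        rw [blen] at h1
        simpa using h1
      have hgd := bget o (by simpa using ho)
      rw [List.getD_eq_getElem _ _ h1] at hgd
      rw [hgd]
      have hrep : (List.replicate (Q + 1) (0 : Int)).getD o 0 = 0 := by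
        rw [List.getD_eq_getElem _ _ (by simpa using ho)]
        simp
      rw [hrep]
      have hcnt : (List.range s.length).countP
            (fun i => decide (i + o < t.length) && (s.getD i ' ' == t.getD (i + o) ' '))
          = matchN s t o := by
        apply List.countP_congr
        intro i hi
        have hi' : i < s.length := List.mem_range.mp hi
        have hb : i + o < t.length := by omega
        simp [matchN, hb]
      rw [hcnt]
      have hLo : L[o] = ((matchN s t o : Nat) : Int) := by
        simp [hL]
      rw [hLo]
      ring
  rw [hctr]

-- ===== VERDICT (by name: the statement is the Claim_ definition above) =====
theorem compare_parses_spec : Claim_equal_compare_parses := by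
  intro parse1 parse2 _
  unfold Spec_compare_parses compare_parses compare_parses_alt
  by_cases h0 : parse1.toList.length = 0 ∨ parse2.toList.length = 0
  · rw [if_pos h0, if_pos h0]
  · rw [if_neg h0, if_neg h0]
    rw [not_or] at h0
    obtain ⟨ha, hb⟩ := h0
    by_cases hc : parse1.toList.length ≤ parse2.toList.length
    · have hgt : ¬ parse1.toList.length > parse2.toList.length := by omega
      rw [if_neg hgt, if_pos hc]
      exact core_eq _ _ (by omega) hc
    · have hgt : parse1.toList.length > parse2.toList.length := by omega
      rw [if_pos hgt, if_neg hc]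
      exact core_eq _ _ (by omega) (by omega)
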